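-- pv_equiv track=rewrite | github.com/soluslab/causalCIM | QIG/QIGTree_hyperplanes.py | getStarInequalities
-- ===== SOURCE A (Python) =====
-- from itertools import chain, combinations
--
-- def powerset(iterable):
--     "powerset([1,2,3]) --> () (1,) (2,) (3,) (1,2) (1,3) (2,3) (1,2,3)"
--     s = list(iterable)
--     return chain.from_iterable(combinations(s, r) for r in range(len(s) + 1))
--
-- def getStarInequalities(T, coords, maxStars):
--     b = [0 for i in coords]
--     A = []
--
--     for starPair in maxStars:
--         for S in powerset(starPair[1]):
--             if len(S) <= 1:
--                 continue
--
--             S = sorted(list(S) + [starPair[0]])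
--
--             a = []
--
--             for C in coords:
--                 if all(j in C for j in S) and all(j == starPair[0] or j in starPair[1] for j in C):
--                     a.append((-1) ** (1 + len(C) - len(S)))
--                 else:
--                     a.append(0)
--
--             A.append(a)
--
--     return [A, b]
-- ===== SOURCE B (Python) =====
-- from itertools import combinations
--
-- def getStarInequalities(T, coords, maxStars):
--     n = len(coords)
--     b = [0] * n
--     A = []
--     for s0, lst in maxStars:
--         lset = set(lst)
--         valid = []
--         for i, C in enumerate(coords):
--             if all(j == s0 or j in lset for j in C):
--                 valid.append((i, set(C), len(C)))
--         for r in range(2, len(lst) + 1):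
--             for comb in combinations(lst, r):
--                 S = sorted(list(comb) + [s0])
--                 k = len(S)
--                 row = [0] * n
--                 for i, Cset, lc in valid:
--                     if all(j in Cset for j in S):
--                         row[i] = -1 if (lc + k) % 2 == 0 else 1
--                 A.append(row)
--     return [A, b]
-- ===== Notes on version B (the rewrite author's own statement) =====
-- stated objective: faster
-- what changed: Per star pair, B precomputes once the table of valid coords (position, element set, length) and, for each qualifying subset taken directly from combinations of size 2..len, fills a zero row by writing only those positions with a parity-computed sign, instead of re-testing every coord (with linear list membership) against every powerset element and recomputing (-1)**e.
import Mathlib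
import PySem

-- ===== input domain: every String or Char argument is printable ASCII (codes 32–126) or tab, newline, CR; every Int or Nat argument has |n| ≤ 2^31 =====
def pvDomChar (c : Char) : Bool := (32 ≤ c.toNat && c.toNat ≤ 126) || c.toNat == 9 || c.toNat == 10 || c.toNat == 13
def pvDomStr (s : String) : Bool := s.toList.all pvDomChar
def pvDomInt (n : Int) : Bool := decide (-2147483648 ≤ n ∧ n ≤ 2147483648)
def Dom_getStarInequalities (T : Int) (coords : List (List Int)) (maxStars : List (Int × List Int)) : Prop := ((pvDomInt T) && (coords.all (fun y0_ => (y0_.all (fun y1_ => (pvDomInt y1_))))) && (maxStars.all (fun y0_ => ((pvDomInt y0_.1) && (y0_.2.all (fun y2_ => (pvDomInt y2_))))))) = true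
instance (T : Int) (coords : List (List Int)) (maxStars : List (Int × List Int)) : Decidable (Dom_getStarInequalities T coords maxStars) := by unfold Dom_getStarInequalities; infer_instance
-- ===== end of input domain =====

-- B precomputes, per star pair, the valid coords (position, element set, length) once and builds each
-- row by writing only those positions, instead of re-testing every coord against every subset.

-- ===== PORT A =====
-- itertools.combinations(s, r) in Python's lexicographic-by-index order
def pvComb : List Int → Nat → List (List Int)
  | _, 0 => [[]]
  | [], _ + 1 => []
  | x :: xs, n + 1 => ((pvComb xs n).map (fun t => x :: t)) ++ pvComb xs (n + 1)

-- powerset(iterable) from Source A: chain of combinations for r in range(len(s)+1)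
def pvPowerset (l : List Int) : List (List Int) :=
  (List.range (l.length + 1)).flatMap (fun r => pvComb l r)

def getStarInequalities (T : Int) (coords : List (List Int)) (maxStars : List (Int × List Int)) : List (List Int) × List Int :=
  let b := coords.map (fun _ => (0 : Int))
  let A := maxStars.foldl (fun Acc sp =>
    (pvPowerset sp.2).foldl (fun Acc2 S =>
      if S.length ≤ 1 then Acc2
      else
        let S' := PySem.List.sorted (S ++ [sp.1]) (fun x => x) false
        Acc2 ++ [coords.map (fun C =>
          if (S'.all (fun j => C.contains j)) && (C.all (fun j => j == sp.1 || sp.2.contains j))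
          -- (-1) ** (1 + len(C) - len(S)); the exponent is nonnegative on Pre_ inputs
          then (-1 : Int) ^ ((1 + (C.length : Int) - (S'.length : Int)).toNat)
          else 0)]) Acc) []
  (A, b)

-- ===== PORT B =====
def getStarInequalities_alt (T : Int) (coords : List (List Int)) (maxStars : List (Int × List Int)) : List (List Int) × List Int :=
  let n := coords.length
  let b := List.replicate n (0 : Int)
  let A := maxStars.foldl (fun Acc sp =>
    let lset := PySem.Set.ofList sp.2
    let valid := (PySem.List.enumerate coords 0).filterMap (fun p =>
      if p.2.all (fun j => j == sp.1 || PySem.Set.contains lset j)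
      then some (p.1, PySem.Set.ofList p.2, p.2.length) else none)
    (PySem.List.pyRange 2 ((sp.2.length : Int) + 1) 1).foldl (fun Acc2 r =>
      (pvComb sp.2 r.toNat).foldl (fun Acc3 c =>
        let S := PySem.List.sorted (c ++ [sp.1]) (fun x => x) false
        let k := S.length
        Acc3 ++ [valid.foldl (fun row v =>
          if S.all (fun j => PySem.Set.contains v.2.1 j)
          then PySem.List.pySetD row v.1 (if (v.2.2 + k) % 2 == 0 then (-1 : Int) else 1)
          else row) (List.replicate n 0)]) Acc2) Acc) []
  (A, b)

-- ===== PRECONDITION & SPEC =====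
-- Pre_ excludes exactly the inputs on which some row entry is (-1) ** e with e < 0: there Python A
-- returns a float (±1.0), not an int of the declared return type. Closed form: no coord C may
-- contain starPair[0], consist only of starPair[0] and elements of starPair[1], and hold fewer
-- positions than starPair[1] has elements (with multiplicity) inside C.
def Pre_getStarInequalities (T : Int) (coords : List (List Int)) (maxStars : List (Int × List Int)) : Prop :=
  ∀ p ∈ maxStars, ∀ C ∈ coords,
    ¬ (p.1 ∈ C ∧ (∀ j ∈ C, j = p.1 ∨ j ∈ p.2) ∧ (C.length : Int) < ((p.2.filter (fun x => decide (x ∈ C))).length : Int))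
instance (T : Int) (coords : List (List Int)) (maxStars : List (Int × List Int)) : Decidable (Pre_getStarInequalities T coords maxStars) := by unfold Pre_getStarInequalities; infer_instance

def pvWitness_getStarInequalities : Int × List (List Int) × (List (Int × List Int)) :=
  (0, [[1, 2]], [(2, [1, 2])])

def Spec_getStarInequalities (T : Int) (coords : List (List Int)) (maxStars : List (Int × List Int)) (out : List (List Int) × List Int) : Prop := out = getStarInequalities_alt T coords maxStars
instance (T : Int) (coords : List (List Int)) (maxStars : List (Int × List Int)) (out : List (List Int) × List Int) : Decidable (Spec_getStarInequalities T coords maxStars out) := by unfold Spec_getStarInequalities; infer_instance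

-- ===== CLAIM (what is proved, stated in full; the proofs are below) =====
def Claim_equal_getStarInequalities : Prop := ∀ (T : Int) (coords : List (List Int)) (maxStars : List (Int × List Int)), Dom_getStarInequalities T coords maxStars → Pre_getStarInequalities T coords maxStars → Spec_getStarInequalities T coords maxStars (getStarInequalities T coords maxStars)

-- ===== LEMMAS AND PROOFS =====

-- members of pvComb l r have length r and are sublists of l
theorem pv_mem_comb {l c : List Int} {r : Nat} (h : c ∈ pvComb l r) : c.length = r ∧ c.Sublist l := by
  induction l generalizing c r with
  | nil => cases r with
    | zero => simp [pvComb] at h; simp [h]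
    | succ n => simp [pvComb] at h
  | cons x xs ih =>
    cases r with
    | zero => simp [pvComb] at h; simp [h]
    | succ n =>
      simp only [pvComb, List.mem_append, List.mem_map] at h
      rcases h with ⟨t, ht, rfl⟩ | h
      · obtain ⟨h1, h2⟩ := ih ht
        exact ⟨by simp [h1], List.Sublist.cons₂ x h2⟩
      · obtain ⟨h1, h2⟩ := ih h
        exact ⟨h1, List.Sublist.cons x h2⟩

-- A's '(-1) ** (1+len(C)-len(S))' equals B's parity test when the exponent is nonnegative
theorem pvSign (lc k : Nat) (h : k ≤ lc + 1) :
    (-1 : Int) ^ ((1 + (lc : Int) - (k : Int)).toNat) = (if ((lc + k) % 2 == 0 : Bool) then (-1 : Int) else 1) := by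
  have he : (1 + (lc : Int) - (k : Int)).toNat = 1 + lc - k := by omega
  rw [he]
  rcases Nat.even_or_odd (1 + lc - k) with hp | hp
  · rw [hp.neg_one_pow]
    have : (lc + k) % 2 = 1 := by rcases hp with ⟨m, hm⟩; omega
    simp [this]
  · rw [hp.neg_one_pow]
    have : (lc + k) % 2 = 0 := by rcases hp with ⟨m, hm⟩; omega
    simp [this]

-- A's 'if skip: continue else append' loop as filter-then-map (mirror image of foldl_append_if)
theorem pvFoldSkip {α β : Type} (p : α → Prop) [DecidablePred p] (f : α → β) (l : List α) (acc : List β) :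
    l.foldl (fun acc x => if p x then acc else acc ++ [f x]) acc
      = acc ++ (l.filter (fun x => decide (¬ p x))).map f := by
  induction l generalizing acc with
  | nil => simp
  | cons x xs ih => by_cases h : p x <;> simp [h, ih]

-- B's row loop: writing the precomputed valid positions of a zero row equals A's per-coord map
theorem pvFoldSet (vb : List Int → Bool) (cb : PySem.Set Int → Bool) (f : Nat → Int) :
    ∀ (cs : List (List Int)) (pre : List Int),
    ((PySem.List.enumerate cs (pre.length : Int)).filterMap (fun p =>
        if vb p.2 then some (p.1, PySem.Set.ofList p.2, p.2.length) else none)).foldl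
      (fun row v => if cb v.2.1 then PySem.List.pySetD row v.1 (f v.2.2) else row)
      (pre ++ List.replicate cs.length 0)
    = pre ++ cs.map (fun C => if cb (PySem.Set.ofList C) && vb C then f C.length else 0) := by
  intro cs
  induction cs with
  | nil => intro pre; simp [PySem.List.enumerate_nil]
  | cons C cs ih =>
    intro pre
    rw [PySem.List.enumerate_cons, List.filterMap_cons]
    have hinit : pre ++ List.replicate (C :: cs).length 0 = (pre ++ [(0:Int)]) ++ List.replicate cs.length 0 := by
      simp [List.replicate_succ]
    by_cases hv : vb C
    · rw [if_pos hv]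
      simp only [List.foldl_cons]
      by_cases hc : cb (PySem.Set.ofList C)
      · have hset : PySem.List.pySetD (pre ++ List.replicate (C :: cs).length 0) ((pre.length : Int)) (f C.length)
            = (pre ++ [f C.length]) ++ List.replicate cs.length 0 := by
          rw [PySem.List.pySetD_natCast, List.length_cons, List.replicate_succ,
            List.set_append_right _ _ (by omega)]
          simp
        rw [if_pos hc, hset,
          show ((pre.length : Int) + 1) = (((pre ++ [f C.length]).length : Int)) by simp,
          ih (pre ++ [f C.length])]
        simp [hc, hv]
      · rw [if_neg hc, hinit,
          show ((pre.length : Int) + 1) = (((pre ++ [(0:Int)]).length : Int)) by simp,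
          ih (pre ++ [0])]
        simp [hc, hv]
    · rw [if_neg hv, hinit,
        show ((pre.length : Int) + 1) = (((pre ++ [(0:Int)]).length : Int)) by simp,
        ih (pre ++ [0])]
      simp [hv]

-- the size-≥-2 members of the powerset, in order, are exactly B's r = 2 … len(lst) enumeration
theorem pvPowSplit (l : List Int) :
    (pvPowerset l).filter (fun S => decide (¬ S.length ≤ 1))
      = (PySem.List.pyRange 2 ((l.length : Int) + 1) 1).flatMap (fun r => pvComb l r.toNat) := by
  have hper : ∀ r, (pvComb l r).filter (fun S => decide (¬ S.length ≤ 1))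
      = if r ≤ 1 then [] else pvComb l r := by
    intro r
    by_cases hr : r ≤ 1
    · rw [if_pos hr, List.filter_eq_nil_iff]
      intro c hc
      have := (pv_mem_comb hc).1
      simp; omega
    · rw [if_neg hr, List.filter_eq_self]
      intro c hc
      have := (pv_mem_comb hc).1
      simp; omega
  rw [pvPowerset, List.filter_flatMap, PySem.List.pyRange_one]
  simp only [hper]
  rw [List.flatMap_map]
  have htn : ∀ k : Nat, ((2 : Int) + (k : Int)).toNat = k + 2 := by intro k; omega
  rcases hn : l.length with _ | n
  · simp
  · rcases n with _ | m
    · simp [List.range_succ_eq_map]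
    · have h1 : ((m + 1 + 1 : Nat) : Int) + 1 - 2 = ((m + 1 : Nat) : Int) := by push_cast; ring
      rw [h1, Int.toNat_natCast]
      rw [List.range_succ_eq_map, List.range_succ_eq_map]
      simp only [List.flatMap_cons, List.flatMap_map]
      simp only [htn]
      norm_num

-- for one qualifying subset, A's per-coord row equals B's set-position row (needs Pre_ for the sign)
theorem pvRowEq (coords : List (List Int)) (s0 : Int) (lst : List Int)
    (hpre : ∀ C ∈ coords, ¬ (s0 ∈ C ∧ (∀ j ∈ C, j = s0 ∨ j ∈ lst) ∧ (C.length : Int) < ((lst.filter (fun x => decide (x ∈ C))).length : Int)))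
    (c : List Int) (r : Nat) (hc : c ∈ pvComb lst r) :
    coords.map (fun C =>
      if ((PySem.List.sorted (c ++ [s0]) (fun x => x) false).all (fun j => C.contains j)) && (C.all (fun j => j == s0 || lst.contains j))
      then (-1 : Int) ^ ((1 + (C.length : Int) - (((PySem.List.sorted (c ++ [s0]) (fun x => x) false)).length : Int)).toNat)
      else 0)
    = ((PySem.List.enumerate coords 0).filterMap (fun p =>
        if p.2.all (fun j => j == s0 || PySem.Set.contains (PySem.Set.ofList lst) j)
        then some (p.1, PySem.Set.ofList p.2, p.2.length) else none)).foldl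
      (fun row v => if (PySem.List.sorted (c ++ [s0]) (fun x => x) false).all (fun j => PySem.Set.contains v.2.1 j)
        then PySem.List.pySetD row v.1 (if (v.2.2 + (PySem.List.sorted (c ++ [s0]) (fun x => x) false).length) % 2 == 0 then (-1 : Int) else 1)
        else row) (List.replicate coords.length 0) := by
  set S' := PySem.List.sorted (c ++ [s0]) (fun x => x) false with hS'
  have hlen : S'.length = r + 1 := by
    rw [hS', PySem.List.length_sorted]; simp [(pv_mem_comb hc).1]
  have := pvFoldSet
    (fun C => C.all (fun j => j == s0 || PySem.Set.contains (PySem.Set.ofList lst) j))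
    (fun s => S'.all (fun j => PySem.Set.contains s j))
    (fun lc => if (lc + S'.length) % 2 == 0 then (-1 : Int) else 1)
    coords []
  simp only [List.length_nil, Nat.cast_zero, List.nil_append] at this
  rw [this]
  apply List.map_congr_left
  intro C hCmem
  have hbridge1 : ∀ j : Int, (PySem.Set.contains (PySem.Set.ofList C) j) = C.contains j := by
    intro j; simp [List.contains_eq_mem, PySem.Set.mem_ofList, PySem.Set.contains]
  have hbridge2 : ∀ j : Int, (PySem.Set.contains (PySem.Set.ofList lst) j) = lst.contains j := by
    intro j; simp [List.contains_eq_mem, PySem.Set.mem_ofList, PySem.Set.contains]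
  simp only [hbridge1, hbridge2]
  by_cases hcond : ((S'.all (fun j => C.contains j)) && (C.all (fun j => j == s0 || lst.contains j))) = true
  · rw [if_pos hcond, if_pos hcond]
    obtain ⟨hsub, hvalid⟩ := Bool.and_eq_true_iff.mp hcond
    have hsubm : ∀ j ∈ S', j ∈ C := by
      intro j hj
      have := List.all_eq_true.mp hsub j hj
      simpa [List.contains_eq_mem] using this
    have hs0 : s0 ∈ C := hsubm s0 (by rw [hS', PySem.List.mem_sorted]; simp)
    have hvalid' : ∀ j ∈ C, j = s0 ∨ j ∈ lst := by
      intro j hj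
      have := List.all_eq_true.mp hvalid j hj
      simpa [List.contains_eq_mem] using this
    have hcC : ∀ x ∈ c, x ∈ C := by
      intro x hx
      exact hsubm x (by rw [hS', PySem.List.mem_sorted]; simp [hx])
    have hfle : ((lst.filter (fun x => decide (x ∈ C))).length : Int) ≤ (C.length : Int) := by
      by_contra hlt
      exact hpre C hCmem ⟨hs0, hvalid', by omega⟩
    have hrle : r ≤ C.length := by
      have hsl : (c.filter (fun x => decide (x ∈ C))).Sublist (lst.filter (fun x => decide (x ∈ C))) :=
        List.Sublist.filter _ (pv_mem_comb hc).2
      have h1 : c.filter (fun x => decide (x ∈ C)) = c := List.filter_eq_self.mpr (by intro a ha; simpa using hcC a ha)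
      have h2 := hsl.length_le
      rw [h1, (pv_mem_comb hc).1] at h2
      omega
    rw [hlen, pvSign C.length (r + 1) (by omega)]
  · rw [if_neg hcond, if_neg hcond]

-- ===== VERDICT (by name: the statement is the Claim_ definition above) =====
theorem getStarInequalities_spec : Claim_equal_getStarInequalities := by
  intro T coords maxStars _ hpre
  unfold Spec_getStarInequalities
  simp only [getStarInequalities, getStarInequalities_alt, Prod.mk.injEq]
  refine ⟨?_, by simp [List.map_const']⟩
  apply PySem.List.foldl_congr_mem
  intro Acc sp hsp
  rw [pvFoldSkip (fun S : List Int => S.length ≤ 1)]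
  simp only [PySem.List.foldl_append_singleton_eq_map]
  rw [PySem.List.foldl_append_eq_flatMap]
  congr 1
  rw [pvPowSplit, List.map_flatMap]
  apply List.flatMap_congr
  intro r hr
  apply List.map_congr_left
  intro c hc
  exact pvRowEq coords sp.1 sp.2 (fun C hC => hpre sp hsp C hC) c r.toNat hc
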